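-- pv_equiv track=rewrite | github.com/rrallo/GenomeBrowser | GenomeBrowser/mkII.py | rspageparser
-- ===== SOURCE A (Python) =====
-- def rspageparser(pagestr):
-- 	entries = pagestr.replace('{', '')
-- 	entries = entries.replace('|', '')
-- 	entries = entries.replace('}', '')
-- 	entries = entries.split('\n')
-- 	dictionary = {}
-- 	for x in entries:
-- 		if 'gene=' in x[:5].lower():
-- 			dictionary['gene'] = x[5:]
-- 		if 'orientation=' in x[:12].lower():
-- 			dictionary['orientation'] = x[12:]
-- 		if 'summary=' in x[:8].lower():
-- 			dictionary['description'] = x[8:]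
-- 		if 'id=' == x[:3].lower() and 'rs' not in x.lower():
-- 			dictionary['omim'] = x[3:]
-- 	return dictionary
-- ===== SOURCE B (Python) =====
-- def rspageparser(pagestr):
--     cleaned = pagestr.replace('{', '').replace('|', '').replace('}', '')
--     keymap = {'gene': 'gene', 'orientation': 'orientation', 'summary': 'description'}
--     dictionary = {}
--     for line in cleaned.split('\n'):
--         key, sep, value = line.partition('=')
--         if not sep:
--             continue
--         k = key.lower()
--         if k in keymap:
--             dictionary[keymap[k]] = value
--         elif k == 'id' and 'rs' not in line.lower():
--             dictionary['omim'] = value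
--     return dictionary
-- ===== Notes on version B (the rewrite author's own statement) =====
-- stated objective: simpler
-- what changed: B tokenizes each line at the first '=' (partition) and dispatches the lowercased key through a small key table instead of A's four fixed-offset slices with case-insensitive prefix tests.
import Mathlib
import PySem

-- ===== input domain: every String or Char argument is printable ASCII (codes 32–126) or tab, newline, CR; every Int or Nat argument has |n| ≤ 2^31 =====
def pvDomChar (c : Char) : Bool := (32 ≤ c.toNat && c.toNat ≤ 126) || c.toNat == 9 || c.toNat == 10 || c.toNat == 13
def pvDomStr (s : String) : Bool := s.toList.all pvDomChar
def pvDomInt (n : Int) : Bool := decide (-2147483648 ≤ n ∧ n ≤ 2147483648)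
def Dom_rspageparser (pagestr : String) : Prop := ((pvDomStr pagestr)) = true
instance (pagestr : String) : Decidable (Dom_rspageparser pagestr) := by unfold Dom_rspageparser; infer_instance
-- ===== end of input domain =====

-- B replaces A's fixed-offset slicing and four prefix tests by '='-tokenization with a key table (simpler decomposition, same cost).

-- ===== PORT A =====
-- loop body of A's 'for x in entries' (four sequential ifs, as in the Python)
def pvLineA (d : PySem.Dict String String) (x : String) : PySem.Dict String String :=
  let d1 := if PySem.Str.isIn "gene=" (PySem.Str.lower (PySem.Str.slice x none (some 5))) then
      PySem.Dict.insert d "gene" (PySem.Str.slice x (some 5) none) else d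
  let d2 := if PySem.Str.isIn "orientation=" (PySem.Str.lower (PySem.Str.slice x none (some 12))) then
      PySem.Dict.insert d1 "orientation" (PySem.Str.slice x (some 12) none) else d1
  let d3 := if PySem.Str.isIn "summary=" (PySem.Str.lower (PySem.Str.slice x none (some 8))) then
      PySem.Dict.insert d2 "description" (PySem.Str.slice x (some 8) none) else d2
  if PySem.Str.lower (PySem.Str.slice x none (some 3)) = "id=" ∧ ¬ PySem.Str.isIn "rs" (PySem.Str.lower x) then
      PySem.Dict.insert d3 "omim" (PySem.Str.slice x (some 3) none) else d3

def rspageparser (pagestr : String) : List (String × String) :=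
  let entries := PySem.Str.replace pagestr "{" ""
  let entries := PySem.Str.replace entries "|" ""
  let entries := PySem.Str.replace entries "}" ""
  match PySem.Str.split? entries "\n" with   -- separator "\n" is non-empty, so split? never raises
  | some lines => (lines.foldl pvLineA PySem.Dict.empty).items
  | none => []

-- ===== PORT B =====
-- exact hand port of line.partition('=') for the 1-char separator '=':
-- some (key, value) when '=' occurs in cs (Python's sep found), none when not (Python's 'if not sep: continue')
def pvPartitionEq : List Char → Option (List Char × List Char)
  | [] => none
  | c :: rest =>
    if c = '=' then some ([], rest)
    else (pvPartitionEq rest).map (fun p => (c :: p.1, p.2))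

def pvKeymap : PySem.Dict String String :=
  ⟨[("gene", "gene"), ("orientation", "orientation"), ("summary", "description")]⟩

-- loop body of B's 'for line in cleaned.split('\n')'
def pvLineB (d : PySem.Dict String String) (line : String) : PySem.Dict String String :=
  match pvPartitionEq line.toList with
  | none => d
  | some (k, v) =>
    let kl := PySem.Str.lower (String.ofList k)
    match PySem.Dict.get? pvKeymap kl with
    | some mapped => PySem.Dict.insert d mapped (String.ofList v)
    | none =>
      if kl = "id" ∧ ¬ PySem.Str.isIn "rs" (PySem.Str.lower line) then
        PySem.Dict.insert d "omim" (String.ofList v)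
      else d

def rspageparser_alt (pagestr : String) : List (String × String) :=
  let cleaned := PySem.Str.replace (PySem.Str.replace (PySem.Str.replace pagestr "{" "") "|" "") "}" ""
  match PySem.Str.split? cleaned "\n" with
  | some lines => (lines.foldl pvLineB PySem.Dict.empty).items
  | none => []

-- ===== PRECONDITION & SPEC =====
def Spec_rspageparser (pagestr : String) (out : List (String × String)) : Prop := out = rspageparser_alt pagestr
instance (pagestr : String) (out : List (String × String)) : Decidable (Spec_rspageparser pagestr out) := by unfold Spec_rspageparser; infer_instance

-- ===== CLAIM (what is proved, stated in full; the proofs are below) =====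
def Claim_equal_rspageparser : Prop := ∀ (pagestr : String), Dom_rspageparser pagestr → Spec_rspageparser pagestr (rspageparser pagestr)

-- ===== LEMMAS AND PROOFS =====

lemma pvLowerChar_eq {c : Char} (h : PySem.Chars.lowerChar c = '=') : c = '=' := by
  unfold PySem.Chars.lowerChar PySem.Chars.isupper at h
  split_ifs at h with hc
  · exfalso
    simp only [Bool.and_eq_true, decide_eq_true_eq, Char.le_def] at hc
    have h1 : (65 : Nat) ≤ c.val.toNat := UInt32.le_iff_toNat_le.mp hc.1
    have h2 : c.val.toNat ≤ 90 := UInt32.le_iff_toNat_le.mp hc.2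
    have hval : (c.toNat + 32).isValidChar := by
      left
      have : c.toNat = c.val.toNat := rfl
      omega
    have h3 := congrArg Char.toNat h
    rw [Char.toNat_ofNat, if_pos hval] at h3
    have h4 : c.toNat = c.val.toNat := rfl
    have h5 : ('=').toNat = 61 := by decide
    omega
  · exact h

lemma pvNotMemLower {k : List Char} (hk : '=' ∉ k) : '=' ∉ PySem.Chars.lower k := by
  intro hm
  unfold PySem.Chars.lower at hm
  obtain ⟨c, hc, he⟩ := List.mem_map.mp hm
  exact hk (pvLowerChar_eq he ▸ hc)

lemma pvPartition_none {cs : List Char} (h : pvPartitionEq cs = none) : '=' ∉ cs := by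
  induction cs with
  | nil => simp
  | cons c t ih =>
    rw [pvPartitionEq] at h
    by_cases hc : c = '='
    · rw [if_pos hc] at h
      exact absurd h (by simp)
    · rw [if_neg hc] at h
      have h' : pvPartitionEq t = none := by
        cases hpt : pvPartitionEq t with
        | none => rfl
        | some p => rw [hpt] at h; simp at h
      simp only [List.mem_cons, not_or]
      exact ⟨fun he => hc he.symm, ih h'⟩

lemma pvPartition_some : ∀ {cs k v : List Char}, pvPartitionEq cs = some (k, v) →
    cs = k ++ '=' :: v ∧ '=' ∉ k := by
  intro cs
  induction cs with
  | nil => intro k v h; simp [pvPartitionEq] at h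
  | cons c t ih =>
    intro k v h
    simp only [pvPartitionEq] at h
    split_ifs at h with hc
    · subst hc
      simp only [Option.some.injEq, Prod.mk.injEq] at h
      obtain ⟨hk, hv⟩ := h
      subst hk; subst hv
      simp
    · simp only [Option.map_eq_some_iff] at h
      obtain ⟨⟨k', v'⟩, hp, he⟩ := h
      simp only [Prod.mk.injEq] at he
      obtain ⟨hk, hv⟩ := he
      obtain ⟨ht, hnk⟩ := ih hp
      subst hk; subst hv; subst ht
      constructor
      · simp
      · simp only [List.mem_cons, not_or]
        exact ⟨fun he => hc he.symm, hnk⟩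

lemma pvEqKey : ∀ (a b u w : List Char), a ++ '=' :: u = b ++ '=' :: w →
    '=' ∉ a → '=' ∉ b → a = b := by
  intro a
  induction a with
  | nil =>
    intro b u w h ha hb
    cases b with
    | nil => rfl
    | cons x bt =>
      simp only [List.nil_append, List.cons_append, List.cons.injEq] at h
      exact absurd (h.1.symm ▸ List.mem_cons_self) hb
  | cons x at' ih =>
    intro b u w h ha hb
    cases b with
    | nil =>
      simp only [List.cons_append, List.nil_append, List.cons.injEq] at h
      exact absurd (h.1 ▸ List.mem_cons_self) ha
    | cons y bt =>
      simp only [List.cons_append, List.cons.injEq] at h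
      have h1 := ih bt u w h.2 (fun hm => ha (List.mem_cons_of_mem _ hm))
        (fun hm => hb (List.mem_cons_of_mem _ hm))
      rw [h.1, h1]

lemma pvPrefixKey {lp lk lv : List Char} (hlp : '=' ∉ lp) (hlk : '=' ∉ lk) :
    (lp ++ ['=']) <+: (lk ++ '=' :: lv) ↔ lp = lk := by
  constructor
  · rintro ⟨t, ht⟩
    have h : lp ++ '=' :: t = lk ++ '=' :: lv := by
      simpa using ht
    exact pvEqKey lp lk t lv h hlp hlk
  · rintro rfl
    exact ⟨lv, by simp⟩

lemma pvInfixTake {pat xs : List Char} {n : Nat} (h : pat.length = n) :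
    pat <:+: xs.take n ↔ pat <+: xs := by
  constructor
  · intro hinf
    have hl := hinf.length_le
    rw [List.length_take] at hl
    have hlen : (xs.take n).length = n := by
      rw [List.length_take]; omega
    have heq : pat = xs.take n := hinf.eq_of_length (h.trans hlen.symm)
    rw [List.prefix_iff_eq_take, h]
    exact heq
  · intro hpre
    rw [List.prefix_iff_eq_take, h] at hpre
    rw [hpre]

lemma pvLowerToList (x : String) :
    (PySem.Str.lower x).toList = PySem.Chars.lower x.toList := by
  simp [PySem.Str.toList_lower]

lemma pvSliceLower (x : String) (n : Int) (h0 : 0 ≤ n) :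
    (PySem.Str.lower (PySem.Str.slice x none (some n))).toList
      = (PySem.Chars.lower x.toList).take n.toNat := by
  rw [pvLowerToList, PySem.Str.toList_slice, PySem.Chars.slice_eq_listSlice,
    PySem.List.slice_to x.toList h0]
  unfold PySem.Chars.lower
  exact List.map_take

lemma pvCondBool (x : String) (pat : String) (n : Int) (h0 : 0 ≤ n)
    (hn : pat.toList.length = n.toNat) :
    (PySem.Str.isIn pat (PySem.Str.lower (PySem.Str.slice x none (some n))) = true)
      ↔ pat.toList <+: PySem.Chars.lower x.toList := by
  rw [PySem.Str.isIn_iff_infix, pvSliceLower x n h0]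
  exact pvInfixTake hn

lemma pvCondId (x : String) :
    (PySem.Str.lower (PySem.Str.slice x none (some 3)) = "id=")
      ↔ "id=".toList <+: PySem.Chars.lower x.toList := by
  rw [← String.toList_inj, pvSliceLower x 3 (by norm_num)]
  rw [List.prefix_iff_eq_take]
  have : ("id=".toList).length = 3 := by decide
  rw [this]
  have h3 : ((3:Int)).toNat = 3 := rfl
  rw [h3]
  exact ⟨fun h => h.symm, fun h => h.symm⟩

lemma pvLowerDecomp (x : String) (k v : List Char) (hx : x.toList = k ++ '=' :: v) :
    PySem.Chars.lower x.toList = PySem.Chars.lower k ++ '=' :: PySem.Chars.lower v := by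
  rw [hx]
  unfold PySem.Chars.lower
  simp only [List.map_append, List.map_cons]
  have h : PySem.Chars.lowerChar '=' = '=' := by decide
  rw [h]

lemma pvCondKey (x : String) (k v lp : List Char) (hx : x.toList = k ++ '=' :: v)
    (hk : '=' ∉ k) (hlp : '=' ∉ lp) :
    ((lp ++ ['=']) <+: PySem.Chars.lower x.toList) ↔ PySem.Chars.lower k = lp := by
  rw [pvLowerDecomp x k v hx, pvPrefixKey hlp (pvNotMemLower hk)]
  exact eq_comm

lemma pvNoEqNoPrefix (x : String) (hne : '=' ∉ x.toList) (lp : List Char) :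
    ¬ ((lp ++ ['=']) <+: PySem.Chars.lower x.toList) := by
  intro hp
  have hm : '=' ∈ lp ++ ['='] := by simp
  have h2 : '=' ∈ PySem.Chars.lower x.toList := hp.sublist.subset hm
  unfold PySem.Chars.lower at h2
  obtain ⟨c, hc, he⟩ := List.mem_map.mp h2
  exact hne (pvLowerChar_eq he ▸ hc)

lemma pvValue (x : String) (k v : List Char) (hx : x.toList = k ++ '=' :: v) (n : Int)
    (h0 : 0 ≤ n) (hn : k.length + 1 = n.toNat) :
    PySem.Str.slice x (some n) none = String.ofList v := by
  rw [← String.toList_inj, PySem.Str.toList_slice, PySem.Chars.slice_eq_listSlice,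
    PySem.List.slice_from x.toList h0, String.toList_ofList, hx, ← hn]
  have : k ++ '=' :: v = (k ++ ['=']) ++ v := by simp
  rw [this]
  have hl : (k ++ ['=']).length = k.length + 1 := by simp
  rw [← hl]
  exact List.drop_left

lemma pvLowerLen (k : List Char) : (PySem.Chars.lower k).length = k.length := by
  unfold PySem.Chars.lower
  simp

set_option maxHeartbeats 1600000 in
lemma pvLine_eq (d : PySem.Dict String String) (x : String) : pvLineA d x = pvLineB d x := by
  cases hp : pvPartitionEq x.toList with
  | none =>
    have hne : '=' ∉ x.toList := pvPartition_none hp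
    have hg : ¬ (PySem.Str.isIn "gene=" (PySem.Str.lower (PySem.Str.slice x none (some 5))) = true) := by
      intro hc
      have h1 := (pvCondBool x "gene=" 5 (by norm_num) (by decide)).mp hc
      rw [show ("gene=" : String).toList = "gene".toList ++ ['='] from by decide] at h1
      exact pvNoEqNoPrefix x hne _ h1
    have ho : ¬ (PySem.Str.isIn "orientation=" (PySem.Str.lower (PySem.Str.slice x none (some 12))) = true) := by
      intro hc
      have h1 := (pvCondBool x "orientation=" 12 (by norm_num) (by decide)).mp hc
      rw [show ("orientation=" : String).toList = "orientation".toList ++ ['='] from by decide] at h1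
      exact pvNoEqNoPrefix x hne _ h1
    have hs : ¬ (PySem.Str.isIn "summary=" (PySem.Str.lower (PySem.Str.slice x none (some 8))) = true) := by
      intro hc
      have h1 := (pvCondBool x "summary=" 8 (by norm_num) (by decide)).mp hc
      rw [show ("summary=" : String).toList = "summary".toList ++ ['='] from by decide] at h1
      exact pvNoEqNoPrefix x hne _ h1
    have hi : ¬ (PySem.Str.lower (PySem.Str.slice x none (some 3)) = "id=" ∧ ¬ PySem.Str.isIn "rs" (PySem.Str.lower x) = true) := by
      intro hc
      have h1 := (pvCondId x).mp hc.1
      rw [show ("id=" : String).toList = "id".toList ++ ['='] from by decide] at h1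
      exact pvNoEqNoPrefix x hne _ h1
    simp only [pvLineA, pvLineB, hp]
    rw [if_neg hg, if_neg ho, if_neg hs, if_neg hi]
  | some kv =>
    obtain ⟨k, v⟩ := kv
    obtain ⟨hx, hk⟩ := pvPartition_some hp
    have hklt : (PySem.Str.lower (String.ofList k)).toList = PySem.Chars.lower k := by
      rw [pvLowerToList, String.toList_ofList]
    have cgene : (PySem.Str.isIn "gene=" (PySem.Str.lower (PySem.Str.slice x none (some 5))) = true)
        ↔ PySem.Chars.lower k = "gene".toList := by
      rw [pvCondBool x "gene=" 5 (by norm_num) (by decide),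
        show ("gene=" : String).toList = "gene".toList ++ ['='] from by decide]
      exact pvCondKey x k v _ hx hk (by decide)
    have cori : (PySem.Str.isIn "orientation=" (PySem.Str.lower (PySem.Str.slice x none (some 12))) = true)
        ↔ PySem.Chars.lower k = "orientation".toList := by
      rw [pvCondBool x "orientation=" 12 (by norm_num) (by decide),
        show ("orientation=" : String).toList = "orientation".toList ++ ['='] from by decide]
      exact pvCondKey x k v _ hx hk (by decide)
    have csum : (PySem.Str.isIn "summary=" (PySem.Str.lower (PySem.Str.slice x none (some 8))) = true)
        ↔ PySem.Chars.lower k = "summary".toList := by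
      rw [pvCondBool x "summary=" 8 (by norm_num) (by decide),
        show ("summary=" : String).toList = "summary".toList ++ ['='] from by decide]
      exact pvCondKey x k v _ hx hk (by decide)
    have cid : (PySem.Str.lower (PySem.Str.slice x none (some 3)) = "id=")
        ↔ PySem.Chars.lower k = "id".toList := by
      rw [pvCondId x, show ("id=" : String).toList = "id".toList ++ ['='] from by decide]
      exact pvCondKey x k v _ hx hk (by decide)
    simp only [pvLineA, pvLineB, hp]
    by_cases h1 : PySem.Chars.lower k = "gene".toList
    · have hkl : PySem.Str.lower (String.ofList k) = "gene" := String.toList_inj.mp (by rw [hklt, h1])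
      have hlen : k.length = 4 := by
        have hll := congrArg List.length h1
        rw [pvLowerLen] at hll
        simpa using hll
      have hval : PySem.Str.slice x (some 5) none = String.ofList v :=
        pvValue x k v hx 5 (by norm_num) (by simp [hlen])
      rw [hkl, show PySem.Dict.get? pvKeymap "gene" = some "gene" from by decide,
        if_pos (cgene.mpr h1),
        if_neg (fun hc => absurd (cori.mp hc) (by rw [h1]; decide)),
        if_neg (fun hc => absurd (csum.mp hc) (by rw [h1]; decide)),
        if_neg (fun hc => absurd (cid.mp hc.1) (by rw [h1]; decide)),
        hval]
    · by_cases h2 : PySem.Chars.lower k = "orientation".toList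
      · have hkl : PySem.Str.lower (String.ofList k) = "orientation" := String.toList_inj.mp (by rw [hklt, h2])
        have hlen : k.length = 11 := by
          have hll := congrArg List.length h2
          rw [pvLowerLen] at hll
          simpa using hll
        have hval : PySem.Str.slice x (some 12) none = String.ofList v :=
          pvValue x k v hx 12 (by norm_num) (by simp [hlen])
        rw [hkl, show PySem.Dict.get? pvKeymap "orientation" = some "orientation" from by decide,
          if_neg (fun hc => absurd (cgene.mp hc) (by rw [h2]; decide)),
          if_pos (cori.mpr h2),
          if_neg (fun hc => absurd (csum.mp hc) (by rw [h2]; decide)),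
          if_neg (fun hc => absurd (cid.mp hc.1) (by rw [h2]; decide)),
          hval]
      · by_cases h3 : PySem.Chars.lower k = "summary".toList
        · have hkl : PySem.Str.lower (String.ofList k) = "summary" := String.toList_inj.mp (by rw [hklt, h3])
          have hlen : k.length = 7 := by
            have hll := congrArg List.length h3
            rw [pvLowerLen] at hll
            simpa using hll
          have hval : PySem.Str.slice x (some 8) none = String.ofList v :=
            pvValue x k v hx 8 (by norm_num) (by simp [hlen])
          rw [hkl, show PySem.Dict.get? pvKeymap "summary" = some "description" from by decide,
            if_neg (fun hc => absurd (cgene.mp hc) (by rw [h3]; decide)),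
            if_neg (fun hc => absurd (cori.mp hc) (by rw [h3]; decide)),
            if_pos (csum.mpr h3),
            if_neg (fun hc => absurd (cid.mp hc.1) (by rw [h3]; decide)),
            hval]
        · by_cases h4 : PySem.Chars.lower k = "id".toList
          · have hkl : PySem.Str.lower (String.ofList k) = "id" := String.toList_inj.mp (by rw [hklt, h4])
            have hlen : k.length = 2 := by
              have hll := congrArg List.length h4
              rw [pvLowerLen] at hll
              simpa using hll
            have hval : PySem.Str.slice x (some 3) none = String.ofList v :=
              pvValue x k v hx 3 (by norm_num) (by simp [hlen])
            rw [hkl, show PySem.Dict.get? pvKeymap "id" = none from by decide]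
            by_cases hrs : PySem.Str.isIn "rs" (PySem.Str.lower x) = true
            · have hidB : ¬(("id" : String) = "id" ∧ ¬ PySem.Str.isIn "rs" (PySem.Str.lower x) = true) :=
                fun hcc => hcc.2 hrs
              have hidA : ¬(PySem.Str.lower (PySem.Str.slice x none (some 3)) = "id=" ∧ ¬ PySem.Str.isIn "rs" (PySem.Str.lower x) = true) :=
                fun hcc => hcc.2 hrs
              rw [if_neg hidB,
                if_neg (fun hc => absurd (cgene.mp hc) (by rw [h4]; decide)),
                if_neg (fun hc => absurd (cori.mp hc) (by rw [h4]; decide)),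
                if_neg (fun hc => absurd (csum.mp hc) (by rw [h4]; decide)),
                if_neg hidA]
            · have hidBpos : (("id" : String) = "id" ∧ ¬ PySem.Str.isIn "rs" (PySem.Str.lower x) = true) := ⟨rfl, hrs⟩
              have hidApos : (PySem.Str.lower (PySem.Str.slice x none (some 3)) = "id=" ∧ ¬ PySem.Str.isIn "rs" (PySem.Str.lower x) = true) := ⟨cid.mpr h4, hrs⟩
              rw [if_pos hidBpos,
                if_neg (fun hc => absurd (cgene.mp hc) (by rw [h4]; decide)),
                if_neg (fun hc => absurd (cori.mp hc) (by rw [h4]; decide)),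
                if_neg (fun hc => absurd (csum.mp hc) (by rw [h4]; decide)),
                if_pos hidApos, hval]
          · have hnone : PySem.Dict.get? pvKeymap (PySem.Str.lower (String.ofList k)) = none := by
              have n1 : (("gene" : String) == PySem.Str.lower (String.ofList k)) = false :=
                beq_eq_false_iff_ne.mpr (fun he => h1 (by rw [← hklt, ← he]))
              have n2 : (("orientation" : String) == PySem.Str.lower (String.ofList k)) = false :=
                beq_eq_false_iff_ne.mpr (fun he => h2 (by rw [← hklt, ← he]))
              have n3 : (("summary" : String) == PySem.Str.lower (String.ofList k)) = false :=
                beq_eq_false_iff_ne.mpr (fun he => h3 (by rw [← hklt, ← he]))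
              simp [pvKeymap, PySem.Dict.get?, List.find?, n1, n2, n3]
            have hidBneg : ¬(PySem.Str.lower (String.ofList k) = "id" ∧ ¬ PySem.Str.isIn "rs" (PySem.Str.lower x) = true) :=
              fun hcc => h4 (by rw [← hklt, hcc.1])
            have hidAneg : ¬(PySem.Str.lower (PySem.Str.slice x none (some 3)) = "id=" ∧ ¬ PySem.Str.isIn "rs" (PySem.Str.lower x) = true) :=
              fun hcc => absurd (cid.mp hcc.1) h4
            rw [hnone, if_neg hidBneg,
              if_neg (fun hc => absurd (cgene.mp hc) h1),
              if_neg (fun hc => absurd (cori.mp hc) h2),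
              if_neg (fun hc => absurd (csum.mp hc) h3),
              if_neg hidAneg]

-- ===== VERDICT (by name: the statement is the Claim_ definition above) =====
set_option maxHeartbeats 1600000 in
theorem rspageparser_spec : Claim_equal_rspageparser := by
  intro pagestr _
  show rspageparser pagestr = rspageparser_alt pagestr
  simp only [rspageparser, rspageparser_alt]
  cases h : PySem.Str.split? (PySem.Str.replace (PySem.Str.replace (PySem.Str.replace pagestr "{" "") "|" "") "}" "") "\n" with
  | none => rfl
  | some lines =>
    exact congrArg PySem.Dict.items
      (PySem.List.foldl_congr_mem lines pvLineA pvLineB PySem.Dict.empty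
        (fun acc a _ => pvLine_eq acc a))
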